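-- pv_equiv track=rewrite | github.com/sandeepkumar8713/pythonapps | 01_array/13_stock_buy_sell.py | stockBuySell
-- ===== SOURCE A (Python) =====
-- def stockBuySell(arr):
--     n = len(arr)
--
--     sol = []
--     if n == 1:
--         return sol
--
--     i = 0
--     while i < n-1:
--         # move while current is higher than next
--         while i < n-1 and arr[i] >= arr[i+1]:
--             i += 1
--
--         if i == n-1:
--             break
--
--         # buy current stock
--         tempDict = {'buy': i}
--         i += 1
--
--         # move while current is higher than previous
--         while i < n and arr[i] >= arr[i-1]:
--             i += 1
--
--         # sell previous stock
--         tempDict['sell'] = i-1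
--         sol.append(tempDict)
--
--     return sol
-- ===== SOURCE B (Python) =====
-- def stockBuySell(arr):
--     n = len(arr)
--     sol = []
--     buy = None
--     for i in range(1, n):
--         if arr[i] > arr[i - 1]:
--             if buy is None:
--                 buy = i - 1
--         elif arr[i] < arr[i - 1]:
--             if buy is not None:
--                 sol.append({'buy': buy, 'sell': i - 1})
--                 buy = None
--         # equal: no-op (plateaus neither open nor close a transaction)
--     if buy is not None:
--         sol.append({'buy': buy, 'sell': n - 1})
--     return sol
-- ===== Notes on version B (the rewrite author's own statement) =====
-- stated objective: simpler
-- what changed: Replaced A's nested run-skipping while loops with one flat for-loop over adjacent pairs that keeps a pending buy index (None = not holding), emitting a pair on a strict drop and flushing an open position after the loop.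
import Mathlib
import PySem

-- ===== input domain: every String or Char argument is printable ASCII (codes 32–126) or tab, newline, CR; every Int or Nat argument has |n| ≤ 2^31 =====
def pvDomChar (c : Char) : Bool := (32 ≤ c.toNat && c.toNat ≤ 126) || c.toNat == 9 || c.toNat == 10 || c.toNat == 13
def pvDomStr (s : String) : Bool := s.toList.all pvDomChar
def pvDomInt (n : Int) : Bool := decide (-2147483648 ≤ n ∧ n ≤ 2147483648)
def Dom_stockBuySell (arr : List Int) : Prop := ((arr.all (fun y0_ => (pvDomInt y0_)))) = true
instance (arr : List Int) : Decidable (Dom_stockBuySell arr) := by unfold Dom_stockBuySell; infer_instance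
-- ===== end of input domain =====

-- B replaces A's nested run-skipping while loops by one flat scan over adjacent
-- pairs with a pending-buy state; objective: simpler.
-- Indices only ever increase from 0 in both programs, so they are kept as Nat;
-- every access is in bounds when it happens, so List.getD is exact here.

-- ===== PORT A =====
-- inner loop 1: while i < n-1 and arr[i] >= arr[i+1]: i += 1
def skipA (arr : List Int) (n i : Nat) : Nat :=
  if h : i < n - 1 ∧ arr.getD (i+1) 0 ≤ arr.getD i 0 then skipA arr n (i+1) else i
termination_by n - 1 - i
decreasing_by exact Nat.sub_succ_lt_self (n-1) i h.1

-- inner loop 2: while i < n and arr[i] >= arr[i-1]: i += 1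
def skipB (arr : List Int) (n i : Nat) : Nat :=
  if h : i < n ∧ arr.getD (i-1) 0 ≤ arr.getD i 0 then skipB arr n (i+1) else i
termination_by n - i
decreasing_by exact Nat.sub_succ_lt_self n i h.1

-- (used by outerA's termination proof)
theorem skipA_ge (arr : List Int) (n i : Nat) : i ≤ skipA arr n i := by
  unfold skipA
  split
  · exact le_trans (Nat.le_succ i) (skipA_ge arr n (i+1))
  · exact le_refl i
termination_by n - 1 - i
decreasing_by rename_i h; exact Nat.sub_succ_lt_self (n-1) i h.1

theorem skipB_ge (arr : List Int) (n i : Nat) : i ≤ skipB arr n i := by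
  unfold skipB
  split
  · exact le_trans (Nat.le_succ i) (skipB_ge arr n (i+1))
  · exact le_refl i
termination_by n - i
decreasing_by rename_i h; exact Nat.sub_succ_lt_self n i h.1

-- the outer while loop of A (j and k written inline)
def outerA (arr : List Int) (n i : Nat) (sol : List (List (String × Int))) :
    List (List (String × Int)) :=
  if h : i < n - 1 then
    if skipA arr n i = n - 1 then sol
    else
      outerA arr n (skipB arr n (skipA arr n i + 1))
        (sol ++ [[("buy", ((skipA arr n i : Nat) : Int)),
                  ("sell", ((skipB arr n (skipA arr n i + 1) - 1 : Nat) : Int))]])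
  else sol
termination_by n - i
decreasing_by
  exact Nat.sub_lt_sub_left (Nat.lt_of_lt_of_le h (Nat.sub_le n 1))
    (Nat.lt_of_lt_of_le (Nat.lt_succ_of_le (skipA_ge arr n i)) (skipB_ge arr n _))

def stockBuySell (arr : List Int) : List (List (String × Int)) :=
  let n := arr.length
  if n = 1 then [] else outerA arr n 0 []

-- ===== PORT B =====
-- the for-loop of B: i runs over range(1, n), state = (sol, pending buy index)
def loopB (arr : List Int) (n i : Nat) (buy : Option Nat)
    (sol : List (List (String × Int))) : List (List (String × Int)) :=
  if h : i < n then
    if arr.getD (i-1) 0 < arr.getD i 0 then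
      match buy with
      | none => loopB arr n (i+1) (some (i-1)) sol
      | some b => loopB arr n (i+1) (some b) sol
    else if arr.getD i 0 < arr.getD (i-1) 0 then
      match buy with
      | some b =>
          loopB arr n (i+1) none
            (sol ++ [[("buy", (b : Int)), ("sell", ((i - 1 : Nat) : Int))]])
      | none => loopB arr n (i+1) none sol
    else loopB arr n (i+1) buy sol
  else
    match buy with
    | some b => sol ++ [[("buy", (b : Int)), ("sell", ((n - 1 : Nat) : Int))]]
    | none => sol
termination_by n - i
decreasing_by all_goals exact Nat.sub_succ_lt_self n i h

def stockBuySell_alt (arr : List Int) : List (List (String × Int)) :=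
  loopB arr arr.length 1 none []

-- ===== PRECONDITION & SPEC =====
def Spec_stockBuySell (arr : List Int) (out : List (List (String × Int))) : Prop := out = stockBuySell_alt arr
instance (arr : List Int) (out : List (List (String × Int))) : Decidable (Spec_stockBuySell arr out) := by unfold Spec_stockBuySell; infer_instance

-- ===== CLAIM (what is proved, stated in full; the proofs are below) =====
def Claim_equal_stockBuySell : Prop := ∀ (arr : List Int), Dom_stockBuySell arr → Spec_stockBuySell arr (stockBuySell arr)

-- ===== LEMMAS AND PROOFS =====

theorem skipA_step (arr : List Int) (n i : Nat) (h1 : i < n - 1)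
    (h2 : arr.getD (i+1) 0 ≤ arr.getD i 0) : skipA arr n i = skipA arr n (i+1) := by
  rw [skipA, dif_pos ⟨h1, h2⟩]

theorem skipA_stop (arr : List Int) (n i : Nat)
    (h : ¬ (i < n - 1 ∧ arr.getD (i+1) 0 ≤ arr.getD i 0)) : skipA arr n i = i := by
  rw [skipA, dif_neg h]

theorem skipB_step (arr : List Int) (n i : Nat) (h1 : i < n)
    (h2 : arr.getD (i-1) 0 ≤ arr.getD i 0) : skipB arr n i = skipB arr n (i+1) := by
  rw [skipB, dif_pos ⟨h1, h2⟩]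

theorem skipB_stop (arr : List Int) (n i : Nat)
    (h : ¬ (i < n ∧ arr.getD (i-1) 0 ≤ arr.getD i 0)) : skipB arr n i = i := by
  rw [skipB, dif_neg h]

theorem skipB_le_n (arr : List Int) (n t : Nat) (ht : t ≤ n) : skipB arr n t ≤ n := by
  rw [skipB]
  split
  · rename_i h
    exact skipB_le_n arr n (t+1) h.1
  · exact ht
termination_by n - t
decreasing_by rename_i h; exact Nat.sub_succ_lt_self n t h.1

theorem outerA_stop (arr : List Int) (n i : Nat) (sol : List (List (String × Int)))
    (h : ¬ i < n - 1) : outerA arr n i sol = sol := by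
  rw [outerA, dif_neg h]

-- A skips a non-rising step: outerA is unchanged when moving from i to i+1
theorem outerA_skip (arr : List Int) (n i : Nat) (sol : List (List (String × Int)))
    (h1 : i < n - 1) (h2 : arr.getD (i+1) 0 ≤ arr.getD i 0) :
    outerA arr n i sol = outerA arr n (i+1) sol := by
  have hskip := skipA_step arr n i h1 h2
  conv_lhs => rw [outerA]
  rw [dif_pos h1, hskip]
  by_cases h3 : i + 1 < n - 1
  · conv_rhs => rw [outerA]
    rw [dif_pos h3]
  · have hs2 : skipA arr n (i+1) = i + 1 := skipA_stop arr n (i+1) (by omega)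
    have he : i + 1 = n - 1 := by omega
    rw [hs2, if_pos he, outerA_stop arr n (i+1) sol h3]

-- Core invariant, one strong induction on the remaining length n - i:
--  (not holding) loopB from i+1 with buy = none equals A's outer loop from i;
--  (holding b)   loopB from t with buy = some b equals "run skipB, then sell".
theorem loop_eq (arr : List Int) (n : Nat) (m : Nat) :
    (∀ i sol, n - i ≤ m → i ≤ n - 1 →
      loopB arr n (i+1) none sol = outerA arr n i sol) ∧
    (∀ t b sol, n - t < m → t ≤ n →
      loopB arr n t (some b) sol =
        (if skipB arr n t = n then
            sol ++ [[("buy", (b : Int)), ("sell", ((n - 1 : Nat) : Int))]]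
         else outerA arr n (skipB arr n t)
           (sol ++ [[("buy", (b : Int)), ("sell", ((skipB arr n t - 1 : Nat) : Int))]]))) := by
  induction m with
  | zero =>
      constructor
      · intro i sol hm hi
        rw [outerA_stop arr n i sol (by omega), loopB, dif_neg (by omega : ¬ i + 1 < n)]
      · intro t b sol hm ht
        exact absurd hm (Nat.not_lt_zero _)
  | succ m ih =>
      obtain ⟨ihN, ihH⟩ := ih
      constructor
      · -- not-holding case
        intro i sol hm hi
        by_cases hlt : i < n - 1
        · have h1 : i + 1 < n := by omega
          by_cases hcmp : arr.getD (i+1) 0 ≤ arr.getD i 0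
          · -- A skips, B no-ops at position i+1
            rw [outerA_skip arr n i sol hlt hcmp]
            have h2 : ¬ arr.getD (i+1-1) 0 < arr.getD (i+1) 0 := by
              simpa using not_lt.mpr hcmp
            have hB : loopB arr n (i+1) none sol = loopB arr n (i+1+1) none sol := by
              conv_lhs => rw [loopB]
              by_cases h3 : arr.getD (i+1) 0 < arr.getD (i+1-1) 0
              · rw [dif_pos h1, if_neg h2, if_pos h3]
              · rw [dif_pos h1, if_neg h2, if_neg h3]
            rw [hB]
            exact ihN (i+1) sol (by omega) (by omega)
          · -- strict rise at i: A buys at i, B sets buy := some i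
            push_neg at hcmp
            have hskip : skipA arr n i = i := skipA_stop arr n i (by push_neg; intro _; omega)
            have h2 : arr.getD (i+1-1) 0 < arr.getD (i+1) 0 := by simpa using hcmp
            have hB : loopB arr n (i+1) none sol = loopB arr n (i+1+1) (some (i+1-1)) sol := by
              conv_lhs => rw [loopB]
              rw [dif_pos h1, if_pos h2]
            have hskipB : skipB arr n (i+1) = skipB arr n (i+1+1) :=
              skipB_step arr n (i+1) h1 (by simpa using le_of_lt hcmp)
            rw [hB]
            have hred : (i+1-1 : Nat) = i := by omega
            rw [hred, ihH (i+1+1) i sol (by omega) (by omega), ← hskipB]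
            conv_rhs => rw [outerA]
            rw [dif_pos hlt, hskip, if_neg (by omega : ¬ i = n - 1)]
            have hkle : i + 1 ≤ skipB arr n (i+1) := skipB_ge arr n (i+1)
            have hkn : skipB arr n (i+1) ≤ n := skipB_le_n arr n (i+1) (by omega)
            by_cases hkeq : skipB arr n (i+1) = n
            · rw [if_pos hkeq, hkeq, outerA_stop arr n n _ (by omega)]
            · rw [if_neg hkeq]
        · -- i = n-1 (or n ≤ 1): both sides return sol
          rw [outerA_stop arr n i sol hlt, loopB, dif_neg (by omega : ¬ i + 1 < n)]
      · -- holding case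
        intro t b sol hm ht
        by_cases htn : t < n
        · by_cases hcmp : arr.getD (t-1) 0 ≤ arr.getD t 0
          · -- skipB continues, B no-ops keeping the position open
            have hskip := skipB_step arr n t htn hcmp
            have hB : loopB arr n t (some b) sol = loopB arr n (t+1) (some b) sol := by
              conv_lhs => rw [loopB]
              by_cases h2 : arr.getD (t-1) 0 < arr.getD t 0
              · rw [dif_pos htn, if_pos h2]
              · rw [dif_pos htn, if_neg h2,
                    if_neg (by omega : ¬ arr.getD t 0 < arr.getD (t-1) 0)]
            rw [hB, ihH (t+1) b sol (by omega) (by omega), hskip]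
          · -- strict drop at t: skipB stops (= t < n), B sells at t-1
            push_neg at hcmp
            have hskip : skipB arr n t = t := skipB_stop arr n t (by push_neg; intro _; omega)
            have hB : loopB arr n t (some b) sol =
                loopB arr n (t+1) none
                  (sol ++ [[("buy", (b : Int)), ("sell", ((t - 1 : Nat) : Int))]]) := by
              conv_lhs => rw [loopB]
              rw [dif_pos htn, if_neg (by omega : ¬ arr.getD (t-1) 0 < arr.getD t 0),
                  if_pos hcmp]
            rw [hB, ihN t _ (by omega) (by omega), hskip, if_neg (by omega : ¬ t = n)]
        · -- t = n: loopB finalizes; skipB n n = n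
          have htn' : t = n := by omega
          rw [loopB, dif_neg (by omega : ¬ t < n),
              skipB_stop arr n t (by omega), if_pos htn']

-- ===== VERDICT (by name: the statement is the Claim_ definition above) =====
theorem stockBuySell_spec : Claim_equal_stockBuySell := by
  intro arr _
  unfold Spec_stockBuySell stockBuySell stockBuySell_alt
  by_cases h1 : arr.length = 1
  · rw [if_pos h1, h1]
    conv_rhs => rw [loopB]
    rw [dif_neg (by omega : ¬ (1:Nat) < 1)]
  · simp only [if_neg h1]
    exact ((loop_eq arr arr.length arr.length).1 0 [] (by omega) (by omega)).symm
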